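-- pv_equiv track=rewrite | github.com/Eric-Thomas/advent-of-code-2024 | day9/day9-2.py | find_next_free_block_start_as_long_as
-- ===== SOURCE A (Python) =====
-- def find_next_free_block_on_or_after(filesystem, i):
--     if i >= len(filesystem):
--         return -1
--     start = i
--     while start < len(filesystem):
--         if filesystem[start] == ".":
--             break
--         start += 1
--
--     if start < len(filesystem) and filesystem[start] == ".":
--         return start
--
--     return -1
--
-- def find_next_free_block_start_as_long_as(filesystem, n):
--     start = find_next_free_block_on_or_after(filesystem, 0)
--     while True:
--         end = start
--         while end + 1 < len(filesystem) and filesystem[end + 1] == ".":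
--             end += 1
--
--         if end - start + 1 >= n:
--             return start
--
--         start = find_next_free_block_on_or_after(filesystem, end + 1)
--         if start == -1:
--             return -1
-- ===== SOURCE B (Python) =====
-- def find_next_free_block_start_as_long_as(filesystem, n):
--     run_len = 0
--     run_start = -1
--     for i in range(len(filesystem)):
--         if filesystem[i] == ".":
--             if run_len == 0:
--                 run_start = i
--             run_len += 1
--             if run_len >= n:
--                 return run_start
--         else:
--             run_len = 0
--     return -1
-- ===== Notes on version B (the rewrite author's own statement) =====
-- stated objective: simpler
-- what changed: Replaced A's helper-based find-run-start-then-measure-run-length jumping loop by one linear scan maintaining the current run's length and start index, returning as soon as the run reaches n.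
import Mathlib
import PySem

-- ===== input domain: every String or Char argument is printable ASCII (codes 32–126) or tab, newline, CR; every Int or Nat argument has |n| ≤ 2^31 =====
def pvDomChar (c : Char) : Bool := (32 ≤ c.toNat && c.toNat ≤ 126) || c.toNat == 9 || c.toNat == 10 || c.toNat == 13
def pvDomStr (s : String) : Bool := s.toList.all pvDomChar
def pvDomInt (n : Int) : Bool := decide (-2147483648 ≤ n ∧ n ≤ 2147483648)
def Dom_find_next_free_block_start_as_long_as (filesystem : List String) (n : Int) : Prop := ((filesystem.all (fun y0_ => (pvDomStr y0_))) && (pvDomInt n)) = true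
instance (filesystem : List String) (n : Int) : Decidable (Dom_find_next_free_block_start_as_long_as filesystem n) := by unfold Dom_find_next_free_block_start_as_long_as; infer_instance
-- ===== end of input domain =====

-- B replaces A's helper-based find-run-start-then-measure-run jumping loop by one
-- linear scan keeping the current run's length and start (objective: simpler).

-- ===== PORT A =====
-- inner 'while start < len: if filesystem[start] == ".": break; start += 1' of the helper
-- (the dite condition and the index guard only make the recursion total; access is exact
-- since the loop only reads filesystem[start] with 0 ≤ start < len)
def pvFindWhile (fs : List String) (start : Int) : Int :=
  if h : start < (fs.length : Int) then
    if (PySem.List.pyGet? fs start).getD "" = "." then start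
    else pvFindWhile fs (start + 1)
  else start
termination_by ((fs.length : Int) - start).toNat
decreasing_by omega

def find_next_free_block_on_or_after (fs : List String) (i : Int) : Int :=
  if i ≥ (fs.length : Int) then -1
  else
    let start := pvFindWhile fs i
    if start < (fs.length : Int) ∧ (PySem.List.pyGet? fs start).getD "" = "." then start
    else -1

-- inner 'while end + 1 < len and filesystem[end + 1] == ".": end += 1' of A's main loop
def pvExtend (fs : List String) (e : Int) : Int :=
  if h : e + 1 < (fs.length : Int) ∧ (PySem.List.pyGet? fs (e + 1)).getD "" = "." then
    pvExtend fs (e + 1)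
  else e
termination_by ((fs.length : Int) - e).toNat
decreasing_by omega

-- facts the outer loop's termination measure needs
theorem pvFindWhile_ge (fs : List String) (i : Int) : i ≤ pvFindWhile fs i := by
  induction i using pvFindWhile.induct fs with
  | case1 x h hdot => rw [pvFindWhile]; simp [h, hdot]
  | case2 x h hdot ih => rw [pvFindWhile]; simp only [h, hdot, dif_pos, if_neg, not_false_iff]; omega
  | case3 x h => rw [pvFindWhile]; simp [h]

theorem pvFind_bounds (fs : List String) (i : Int)
    (h : find_next_free_block_on_or_after fs i ≠ -1) :
    i ≤ find_next_free_block_on_or_after fs i ∧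
      find_next_free_block_on_or_after fs i < (fs.length : Int) := by
  unfold find_next_free_block_on_or_after at *
  by_cases hge : i ≥ (fs.length : Int)
  · simp [hge] at h
  · simp only [hge, if_neg, not_false_iff] at h ⊢
    by_cases hc : pvFindWhile fs i < (fs.length : Int) ∧
        (PySem.List.pyGet? fs (pvFindWhile fs i)).getD "" = "."
    · simp only [hc]
      exact ⟨pvFindWhile_ge fs i, hc.1⟩
    · simp [hc] at h

theorem pvExtend_ge (fs : List String) (e : Int) : e ≤ pvExtend fs e := by
  induction e using pvExtend.induct fs with
  | case1 x h ih => rw [pvExtend, dif_pos h]; omega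
  | case2 x h => rw [pvExtend, dif_neg h]

-- A's outer 'while True' loop
def pvLoop (fs : List String) (n : Int) (start : Int) : Int :=
  let e := pvExtend fs start
  if e - start + 1 ≥ n then start
  else
    let s' := find_next_free_block_on_or_after fs (e + 1)
    if h : s' = -1 then -1
    else pvLoop fs n s'
termination_by ((fs.length : Int) + 1 - start).toNat
decreasing_by
  have h1 := pvExtend_ge fs start
  have h2 := pvFind_bounds fs (pvExtend fs start + 1) h
  omega

def find_next_free_block_start_as_long_as (filesystem : List String) (n : Int) : Int :=
  pvLoop filesystem n (find_next_free_block_on_or_after filesystem 0)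

-- ===== PORT B =====
-- the single scan of Source B: i is the absolute index, runLen/runStart the accumulators
def pvAltGo (n : Int) (rest : List String) (i : Int) (runLen : Int) (runStart : Int) : Int :=
  match rest with
  | [] => -1
  | x :: xs =>
    if x = "." then
      let rs := if runLen = 0 then i else runStart
      let rl := runLen + 1
      if rl ≥ n then rs
      else pvAltGo n xs (i + 1) rl rs
    else pvAltGo n xs (i + 1) 0 runStart

def find_next_free_block_start_as_long_as_alt (filesystem : List String) (n : Int) : Int :=
  pvAltGo n filesystem 0 0 (-1)

-- ===== PRECONDITION & SPEC =====
def Spec_find_next_free_block_start_as_long_as (filesystem : List String) (n : Int) (out : Int) : Prop := out = find_next_free_block_start_as_long_as_alt filesystem n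
instance (filesystem : List String) (n : Int) (out : Int) : Decidable (Spec_find_next_free_block_start_as_long_as filesystem n out) := by unfold Spec_find_next_free_block_start_as_long_as; infer_instance

-- ===== CLAIM (what is proved, stated in full; the proofs are below) =====
def Claim_equal_find_next_free_block_start_as_long_as : Prop := ∀ (filesystem : List String) (n : Int), Dom_find_next_free_block_start_as_long_as filesystem n → Spec_find_next_free_block_start_as_long_as filesystem n (find_next_free_block_start_as_long_as filesystem n)

-- ===== LEMMAS AND PROOFS =====

-- number of leading "." entries
def pvLd : List String → Nat
  | [] => 0
  | x :: xs => if x = "." then pvLd xs + 1 else 0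

-- number of leading non-"." entries
def pvNd : List String → Nat
  | [] => 0
  | x :: xs => if x = "." then 0 else pvNd xs + 1

-- reference function both ports are reduced to: first absolute index i whose entry is "."
-- and whose run of dots has length ≥ n, else -1
def pvH (n : Int) : List String → Int → Int
  | [], _ => -1
  | x :: xs, i => if x = "." ∧ (pvLd (x :: xs) : Int) ≥ n then i else pvH n xs (i + 1)

-- first-dot index, the value of find_next_free_block_on_or_after
def pvFd : List String → Int → Int
  | [], _ => -1
  | x :: xs, i => if x = "." then i else pvFd xs (i + 1)

theorem pvNd_le (l : List String) : pvNd l ≤ l.length := by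
  induction l with
  | nil => simp [pvNd]
  | cons x xs ih => by_cases h : x = "." <;> simp [pvNd, h] <;> omega

theorem pvFd_eq (l : List String) : ∀ i : Int,
    pvFd l i = if pvNd l = l.length then -1 else i + (pvNd l : Int) := by
  induction l with
  | nil => intro i; simp [pvFd, pvNd]
  | cons x xs ih =>
    intro i
    by_cases h : x = "."
    · have := pvNd_le xs
      rw [pvFd, if_pos h]
      rw [if_neg (by simp [pvNd, h])]
      simp [pvNd, h]
    · rw [pvFd, if_neg h, ih (i + 1)]
      have hnd : pvNd (x :: xs) = pvNd xs + 1 := by simp [pvNd, h]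
      by_cases h1 : pvNd xs = xs.length
      · rw [if_pos h1, if_pos (by simp [hnd, h1])]
      · rw [if_neg h1, if_neg (by simp [hnd]; omega)]
        rw [hnd]; push_cast; ring

theorem pvLd_of_nodot (l : List String) (h : pvNd l = l.length) : pvLd l = 0 := by
  cases l with
  | nil => rfl
  | cons x xs =>
    by_cases hx : x = "."
    · simp [pvNd, hx] at h
    · simp [pvLd, hx]

theorem pvH_of_nodot (n : Int) (l : List String) (h : pvNd l = l.length) :
    ∀ i : Int, pvH n l i = -1 := by
  induction l with
  | nil => intro i; simp [pvH]
  | cons x xs ih =>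
    intro i
    have hx : ¬ x = "." := by
      intro hx; simp [pvNd, hx] at h
    rw [pvH, if_neg (by simp [hx])]
    exact ih (by simp [pvNd, hx] at h; omega) (i + 1)

theorem pvH_skip_nd (n : Int) (l : List String) : ∀ i : Int,
    pvH n l i = pvH n (l.drop (pvNd l)) (i + (pvNd l : Int)) := by
  induction l with
  | nil => intro i; simp [pvNd]
  | cons x xs ih =>
    intro i
    by_cases hx : x = "."
    · simp [pvNd, hx]
    · have hnd : pvNd (x :: xs) = pvNd xs + 1 := by simp [pvNd, hx]
      rw [pvH, if_neg (by simp [hx]), ih (i + 1), hnd, List.drop_succ_cons]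
      congr 1
      push_cast
      ring

theorem pvH_skip_run (n : Int) (l : List String) (hl : (pvLd l : Int) < n) : ∀ i : Int,
    pvH n l i = pvH n (l.drop (pvLd l)) (i + (pvLd l : Int)) := by
  induction l with
  | nil => intro i; simp [pvLd]
  | cons x xs ih =>
    intro i
    by_cases hx : x = "."
    · have hld : pvLd (x :: xs) = pvLd xs + 1 := by simp [pvLd, hx]
      rw [hld] at hl ⊢
      rw [pvH, if_neg (by rw [hld]; omega), ih (by omega) (i + 1), List.drop_succ_cons]
      congr 1
      push_cast
      ring
    · simp [pvLd, hx]

theorem pvLd_drop_nd (l : List String) (h : pvNd l < l.length) :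
    1 ≤ pvLd (l.drop (pvNd l)) := by
  induction l with
  | nil => simp at h
  | cons x xs ih =>
    by_cases hx : x = "."
    · simp [pvNd, hx, pvLd]
    · have hnd : pvNd (x :: xs) = pvNd xs + 1 := by simp [pvNd, hx]
      rw [hnd, List.drop_succ_cons]
      exact ih (by rw [hnd] at h; simp at h; omega)

-- the helper computes pvFd
theorem pvFindWhile_spec (fs : List String) : ∀ (m : Nat) (i : Int), 0 ≤ i →
    ((fs.length : Int) - i).toNat ≤ m →
    (if pvFindWhile fs i < (fs.length : Int) ∧
        (PySem.List.pyGet? fs (pvFindWhile fs i)).getD "" = "." then pvFindWhile fs i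
     else -1) = pvFd (fs.drop i.toNat) i := by
  intro m
  induction m with
  | zero =>
    intro i hi hm
    have hge : ¬ i < (fs.length : Int) := by omega
    rw [pvFindWhile, dif_neg hge]
    rw [List.drop_eq_nil_of_le (by omega)]
    simp [pvFd, hge]
  | succ m ih =>
    intro i hi hm
    by_cases hlt : i < (fs.length : Int)
    · have hnat : i.toNat < fs.length := by omega
      have hdrop : fs.drop i.toNat = fs[i.toNat] :: fs.drop (i.toNat + 1) :=
        List.drop_eq_getElem_cons hnat
      have hget : PySem.List.pyGet? fs i = some fs[i.toNat] :=
        PySem.List.pyGet?_eq_some_getElem fs hi hlt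
      by_cases hdot : fs[i.toNat] = "."
      · have hfw : pvFindWhile fs i = i := by
          rw [pvFindWhile, dif_pos hlt, if_pos (by rw [hget]; simpa using hdot)]
        rw [hfw, if_pos ⟨hlt, by rw [hget]; simpa using hdot⟩, hdrop]
        simp [pvFd, hdot]
      · have hfw : pvFindWhile fs i = pvFindWhile fs (i + 1) := by
          rw [pvFindWhile, dif_pos hlt, if_neg (by rw [hget]; simpa using hdot)]
        have hstep : pvFd (fs.drop i.toNat) i = pvFd (fs.drop (i.toNat + 1)) (i + 1) := by
          rw [hdrop]; simp [pvFd, hdot]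
        have hcast : (i + 1).toNat = i.toNat + 1 := by omega
        rw [hfw, hstep, ← hcast]
        exact ih (i + 1) (by omega) (by omega)
    · rw [pvFindWhile, dif_neg hlt]
      rw [List.drop_eq_nil_of_le (by omega)]
      simp [pvFd, hlt]

theorem pvFind_eq_fd (fs : List String) (i : Int) (hi : 0 ≤ i) :
    find_next_free_block_on_or_after fs i = pvFd (fs.drop i.toNat) i := by
  unfold find_next_free_block_on_or_after
  by_cases h : i ≥ (fs.length : Int)
  · rw [if_pos h, List.drop_eq_nil_of_le (by omega)]
    simp [pvFd]
  · rw [if_neg h]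
    exact pvFindWhile_spec fs ((fs.length : Int) - i).toNat i hi le_rfl

theorem pvExtend_spec (fs : List String) : ∀ (m : Nat) (e : Int), -1 ≤ e →
    ((fs.length : Int) - e).toNat ≤ m →
    pvExtend fs e = e + (pvLd (fs.drop (e + 1).toNat) : Int) := by
  intro m
  induction m with
  | zero =>
    intro e he hm
    have hge : ¬ e + 1 < (fs.length : Int) := by omega
    rw [pvExtend, dif_neg (by intro hc; exact hge hc.1)]
    rw [List.drop_eq_nil_of_le (by omega)]
    simp [pvLd]
  | succ m ih =>
    intro e he hm
    by_cases hlt : e + 1 < (fs.length : Int)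
    · have hnat : (e + 1).toNat < fs.length := by omega
      have hdrop : fs.drop (e + 1).toNat = fs[(e + 1).toNat] :: fs.drop ((e + 1).toNat + 1) :=
        List.drop_eq_getElem_cons hnat
      have hget : PySem.List.pyGet? fs (e + 1) = some fs[(e + 1).toNat] :=
        PySem.List.pyGet?_eq_some_getElem fs (by omega) hlt
      by_cases hdot : fs[(e + 1).toNat] = "."
      · rw [pvExtend, dif_pos ⟨hlt, by rw [hget]; simpa using hdot⟩]
        rw [ih (e + 1) (by omega) (by omega)]
        have hcast : (e + 1 + 1).toNat = (e + 1).toNat + 1 := by omega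
        rw [hcast, hdrop]
        simp only [pvLd, hdot, if_pos]
        push_cast
        ring
      · rw [pvExtend, dif_neg (by intro hc; exact hdot (by rw [hget] at hc; simpa using hc.2))]
        rw [hdrop]
        simp [pvLd, hdot]
    · rw [pvExtend, dif_neg (by intro hc; exact hlt hc.1)]
      rw [List.drop_eq_nil_of_le (by omega)]
      simp [pvLd]

theorem pvLoop_spec (fs : List String) (n : Int) : ∀ (m : Nat) (s : Nat),
    fs.length - s ≤ m → s < fs.length → 1 ≤ pvLd (fs.drop s) →
    pvLoop fs n (s : Int) = pvH n (fs.drop s) (s : Int) := by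
  intro m
  induction m with
  | zero => intro s hm hs hld; omega
  | succ m ih =>
    intro s hm hs hld
    have hdrop : fs.drop s = fs[s] :: fs.drop (s + 1) := List.drop_eq_getElem_cons hs
    have hdot : fs[s] = "." := by
      by_contra hx
      rw [hdrop] at hld
      simp [pvLd, hx] at hld
    have hL : pvLd (fs.drop s) = pvLd (fs.drop (s + 1)) + 1 := by
      rw [hdrop]; simp [pvLd, hdot]
    have hext : pvExtend fs (s : Int) = (s : Int) + (pvLd (fs.drop (s + 1)) : Int) := by
      have h1 := pvExtend_spec fs ((fs.length : Int) - s).toNat (s : Int) (by omega) le_rfl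
      have hc : ((s : Int) + 1).toNat = s + 1 := by omega
      rw [hc] at h1
      exact h1
    rw [pvLoop, hext]
    by_cases hcond : (s : Int) + (pvLd (fs.drop (s + 1)) : Int) - (s : Int) + 1 ≥ n
    · have hge : (pvLd (fs[s] :: fs.drop (s + 1)) : Int) ≥ n := by
        have h2 : pvLd (fs[s] :: fs.drop (s + 1)) = pvLd (fs.drop (s + 1)) + 1 := by
          simp [pvLd, hdot]
        rw [h2]
        push_cast
        omega
      rw [if_pos hcond, hdrop, pvH]
      rw [if_pos ⟨hdot, hge⟩]
    · rw [if_neg hcond]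
      have hLn : (pvLd (fs.drop s) : Int) < n := by rw [hL]; push_cast; omega
      have hfd : find_next_free_block_on_or_after fs
            ((s : Int) + (pvLd (fs.drop (s + 1)) : Int) + 1)
          = pvFd (fs.drop (s + pvLd (fs.drop s))) ((s + pvLd (fs.drop s) : Nat) : Int) := by
        have harg : (s : Int) + (pvLd (fs.drop (s + 1)) : Int) + 1
            = ((s + pvLd (fs.drop s) : Nat) : Int) := by rw [hL]; push_cast; ring
        rw [harg, pvFind_eq_fd fs _ (Int.natCast_nonneg _), Int.toNat_natCast]
      show (if h : find_next_free_block_on_or_after fs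
              ((s : Int) + (pvLd (fs.drop (s + 1)) : Int) + 1) = -1 then (-1 : Int)
            else pvLoop fs n (find_next_free_block_on_or_after fs
              ((s : Int) + (pvLd (fs.drop (s + 1)) : Int) + 1))) = pvH n (fs.drop s) (s : Int)
      rw [hfd]
      have hHchain : pvH n (fs.drop s) (s : Int)
          = pvH n (fs.drop (s + pvLd (fs.drop s))) ((s + pvLd (fs.drop s) : Nat) : Int) := by
        rw [pvH_skip_run n (fs.drop s) hLn, List.drop_drop]
        norm_cast
      rw [pvFd_eq]
      by_cases hnod : pvNd (fs.drop (s + pvLd (fs.drop s))) = (fs.drop (s + pvLd (fs.drop s))).length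
      · rw [if_pos hnod, dif_pos rfl, hHchain, pvH_of_nodot n _ hnod]
      · rw [if_neg hnod]
        have hndlt : pvNd (fs.drop (s + pvLd (fs.drop s))) < (fs.drop (s + pvLd (fs.drop s))).length :=
          lt_of_le_of_ne (pvNd_le _) hnod
        have htlen : (fs.drop (s + pvLd (fs.drop s))).length = fs.length - (s + pvLd (fs.drop s)) :=
          List.length_drop
        have harg2 : ((s + pvLd (fs.drop s) : Nat) : Int) + (pvNd (fs.drop (s + pvLd (fs.drop s))) : Int)
            = ((s + pvLd (fs.drop s) + pvNd (fs.drop (s + pvLd (fs.drop s))) : Nat) : Int) := by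
          push_cast; ring
        rw [dif_neg (by rw [harg2]; omega), harg2]
        have hdrop2 : fs.drop (s + pvLd (fs.drop s) + pvNd (fs.drop (s + pvLd (fs.drop s))))
            = (fs.drop (s + pvLd (fs.drop s))).drop (pvNd (fs.drop (s + pvLd (fs.drop s)))) := by
          rw [List.drop_drop]
        rw [ih _ (by omega) (by omega) (by rw [hdrop2]; exact pvLd_drop_nd _ hndlt)]
        rw [hHchain]
        conv_rhs => rw [pvH_skip_nd n (fs.drop (s + pvLd (fs.drop s)))]
        rw [← hdrop2, harg2]

theorem pvAltGo_spec (n : Int) : ∀ (xs : List String) (i rl rs : Int),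
    (rl = 0 ∨ (1 ≤ rl ∧ rl < n)) →
    pvAltGo n xs i rl rs =
      if 1 ≤ rl ∧ rl + (pvLd xs : Int) ≥ n then rs else pvH n xs i := by
  intro xs
  induction xs with
  | nil =>
    intro i rl rs hrl
    rcases hrl with h0 | h1
    · rw [if_neg (fun hc => absurd hc.1 (by omega))]; rfl
    · rw [if_neg (fun hc => by simp only [pvLd, Nat.cast_zero] at hc; omega)]; rfl
  | cons x xs ih =>
    intro i rl rs hrl
    by_cases hx : x = "."
    · subst hx
      have hld : pvLd ("." :: xs) = pvLd xs + 1 := by simp [pvLd]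
      rw [pvAltGo, if_pos rfl]
      show (if rl + 1 ≥ n then (if rl = 0 then i else rs)
            else pvAltGo n xs (i + 1) (rl + 1) (if rl = 0 then i else rs)) =
           if 1 ≤ rl ∧ rl + (pvLd ("." :: xs) : Int) ≥ n then rs else pvH n ("." :: xs) i
      rcases hrl with h0 | h1
      · subst h0
        rw [show (if (0 : Int) = 0 then i else rs) = i from if_pos rfl]
        rw [show (if 1 ≤ (0 : Int) ∧ (0 : Int) + (pvLd ("." :: xs) : Int) ≥ n then rs
                  else pvH n ("." :: xs) i) = pvH n ("." :: xs) i
            from if_neg (fun hc => absurd hc.1 (by omega))]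
        by_cases hret : (0 : Int) + 1 ≥ n
        · rw [if_pos hret, pvH, if_pos ⟨rfl, by rw [hld]; push_cast; omega⟩]
        · rw [if_neg hret, show (0:Int) + 1 = 1 from by ring, ih (i + 1) 1 i (Or.inr ⟨le_refl 1, by omega⟩), pvH]
          by_cases hc1 : (1 : Int) + (pvLd xs : Int) ≥ n
          · rw [if_pos ⟨le_refl 1, hc1⟩, if_pos ⟨rfl, by rw [hld]; push_cast; omega⟩]
          · rw [if_neg (fun hc => hc1 hc.2),
              if_neg (fun hc => hc1 (by rw [hld] at hc; push_cast at hc ⊢; omega))]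
      · rw [show (if rl = 0 then i else rs) = rs from if_neg (by omega)]
        by_cases hret : rl + 1 ≥ n
        · rw [if_pos hret, if_pos ⟨h1.1, by rw [hld]; push_cast; omega⟩]
        · rw [if_neg hret, ih (i + 1) (rl + 1) rs (Or.inr ⟨by omega, by omega⟩)]
          by_cases hc1 : rl + 1 + (pvLd xs : Int) ≥ n
          · rw [if_pos ⟨by omega, hc1⟩, if_pos ⟨h1.1, by rw [hld]; push_cast; omega⟩]
          · rw [if_neg (fun hc => hc1 hc.2),
              if_neg (fun hc => hc1 (by rw [hld] at hc; push_cast at hc ⊢; omega)),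
              pvH,
              if_neg (fun hc => hc1 (by rw [hld] at hc; push_cast at hc ⊢; omega))]
    · have hld : pvLd (x :: xs) = 0 := by simp [pvLd, hx]
      rw [pvAltGo, if_neg hx]
      rw [ih (i + 1) 0 rs (Or.inl rfl)]
      rw [if_neg (fun hc => absurd hc.1 (by omega))]
      rw [if_neg (fun hc => by
            rw [hld] at hc; rcases hrl with h0 | h1 <;> push_cast at hc <;> omega)]
      rw [pvH, if_neg (fun hc => hx hc.1)]

-- the two ports agree: both equal pvH
theorem pvPorts_agree : ∀ (fs : List String) (n : Int),
    pvLoop fs n (find_next_free_block_on_or_after fs 0) = pvAltGo n fs 0 0 (-1) := by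
  intro fs n
  rw [pvAltGo_spec n fs 0 0 (-1) (Or.inl rfl), if_neg (fun hc => absurd hc.1 (by omega))]
  rw [pvFind_eq_fd fs 0 le_rfl]
  simp only [Int.toNat_zero, List.drop_zero]
  rw [pvFd_eq fs]
  by_cases hnod : pvNd fs = fs.length
  · rw [if_pos hnod, pvH_of_nodot n fs hnod]
    have hld0 : pvLd fs = 0 := pvLd_of_nodot fs hnod
    rw [pvLoop]
    have hext : pvExtend fs (-1) = -1 := by
      have h1 := pvExtend_spec fs ((fs.length : Int) + 1).toNat (-1) le_rfl (by omega)
      rw [show ((-1 : Int) + 1).toNat = 0 by omega] at h1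
      simp only [List.drop_zero, hld0] at h1
      simpa using h1
    rw [hext]
    by_cases hc : (-1 : Int) - (-1) + 1 ≥ n
    · rw [if_pos hc]
    · rw [if_neg hc]
      have hfind0 : find_next_free_block_on_or_after fs (-1 + 1) = -1 := by
        rw [show (-1 : Int) + 1 = 0 by ring, pvFind_eq_fd fs 0 le_rfl]
        simp only [Int.toNat_zero, List.drop_zero]
        rw [pvFd_eq fs, if_pos hnod]
      rw [dif_pos hfind0]
  · rw [if_neg hnod]
    have hndlt : pvNd fs < fs.length := lt_of_le_of_ne (pvNd_le fs) hnod
    have h0 : (0 : Int) + (pvNd fs : Int) = ((pvNd fs : Nat) : Int) := by ring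
    rw [h0]
    rw [pvLoop_spec fs n fs.length (pvNd fs) (by omega) hndlt (pvLd_drop_nd fs hndlt)]
    conv_rhs => rw [pvH_skip_nd n fs]
    rw [show (0 : Int) + (pvNd fs : Int) = (pvNd fs : Int) by ring]

-- ===== VERDICT (by name: the statement is the Claim_ definition above) =====
theorem find_next_free_block_start_as_long_as_spec : Claim_equal_find_next_free_block_start_as_long_as := by
  intro fs n _
  unfold Spec_find_next_free_block_start_as_long_as
  unfold find_next_free_block_start_as_long_as find_next_free_block_start_as_long_as_alt
  exact pvPorts_agree fs n
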